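-- pv_equiv track=rewrite | github.com/yvonneyeh/algorithms | arrays/drills.py | count_elements_matching_occurences
-- ===== SOURCE A (Python) =====
-- def count_elements_matching_occurences(arr, n):
--
--     if not arr:
--         return None
--
--     num_count = {}
--     result = 0
--
--     for num in arr:
--         num_count[num] = num_count.get(num, 0) + 1
--
--     for num, count in num_count.items():
--         if count == n:
--             result += 1
--
--     return result
-- ===== SOURCE B (Python) =====
-- def count_elements_matching_occurences(arr, n):
--
--     if not arr:
--         return None
--
--     num_count = {}
--     result = 0
--
--     for num in arr:
--         if num in num_count:
--             if num_count[num] == n: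
--                 result -= 1
--             num_count[num] += 1
--         else:
--             num_count[num] = 1
--         if num_count[num] == n:
--             result += 1
--
--     return result
-- ===== Notes on version B (the rewrite author's own statement) =====
-- stated objective: alternative
-- what changed: Single pass that maintains the running count of values currently occurring exactly n times (adjusting it as each occurrence moves a value's count past n), instead of building the whole counter first and then scanning its items in a second loop.
import Mathlib
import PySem

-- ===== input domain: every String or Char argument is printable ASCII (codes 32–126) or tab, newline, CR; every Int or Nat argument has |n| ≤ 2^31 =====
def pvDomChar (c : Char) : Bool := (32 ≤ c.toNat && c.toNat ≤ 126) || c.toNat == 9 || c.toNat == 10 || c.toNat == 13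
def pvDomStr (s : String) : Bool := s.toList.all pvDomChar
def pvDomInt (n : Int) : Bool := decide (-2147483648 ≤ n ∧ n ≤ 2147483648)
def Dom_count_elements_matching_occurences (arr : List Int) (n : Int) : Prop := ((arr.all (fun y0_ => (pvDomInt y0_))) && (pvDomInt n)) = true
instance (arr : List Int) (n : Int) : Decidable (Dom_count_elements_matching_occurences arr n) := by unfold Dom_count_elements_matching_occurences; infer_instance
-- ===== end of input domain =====

-- One-pass re-implementation: B maintains the running number of values currently occurring
-- exactly n times inside the single counting loop, instead of A's second scan over the dict.


-- ===== PORT A =====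
def count_elements_matching_occurences (arr : List Int) (n : Int) : Option Int :=
  if arr = [] then none
  else
    let num_count : PySem.Dict Int Int :=
      arr.foldl (fun d num => d.insert num (d.getD num 0 + 1)) PySem.Dict.empty
    let result : Int :=
      num_count.items.foldl (fun r p => if p.2 = n then r + 1 else r) 0
    some result

-- ===== PORT B =====
-- one loop body: update the count of num, keeping `result` = #values with current count n
def pvAltStep (n : Int) (s : PySem.Dict Int Int × Int) (num : Int) : PySem.Dict Int Int × Int :=
  let d := s.1
  let r := s.2
  let r1 : Int := if d.contains num then (if d.getD num 0 = n then r - 1 else r) else r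
  let d1 : PySem.Dict Int Int :=
    if d.contains num then d.insert num (d.getD num 0 + 1) else d.insert num 1
  let r2 : Int := if d1.getD num 0 = n then r1 + 1 else r1
  (d1, r2)

def count_elements_matching_occurences_alt (arr : List Int) (n : Int) : Option Int :=
  if arr = [] then none
  else some ((arr.foldl (pvAltStep n) (PySem.Dict.empty, 0)).2)

-- ===== PRECONDITION & SPEC =====
def Spec_count_elements_matching_occurences (arr : List Int) (n : Int) (out : Option Int) : Prop := out = count_elements_matching_occurences_alt arr n
instance (arr : List Int) (n : Int) (out : Option Int) : Decidable (Spec_count_elements_matching_occurences arr n out) := by unfold Spec_count_elements_matching_occurences; infer_instance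

-- ===== CLAIM (what is proved, stated in full; the proofs are below) =====
def Claim_equal_count_elements_matching_occurences : Prop := ∀ (arr : List Int) (n : Int), Dom_count_elements_matching_occurences arr n → Spec_count_elements_matching_occurences arr n (count_elements_matching_occurences arr n)

-- ===== LEMMAS AND PROOFS =====

-- Replacing the unique entry with key x (old value `old`) by (x, v) changes the number of
-- value-n entries by (if v = n) - (if old = n).
lemma pv_countP_replace (n : Int) :
    ∀ (items : List (Int × Int)) (x old v : Int),
      (items.map (·.1)).Nodup → (x, old) ∈ items →
      ((items.map (fun p => if p.1 == x then (x, v) else p)).countP (fun p => p.2 = n) : Int)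
        = (items.countP (fun p => p.2 = n) : Int)
          + (if v = n then 1 else 0) - (if old = n then 1 else 0) := by
  intro items
  induction items with
  | nil => intro x old v _ h; simp at h
  | cons hd tl ih =>
    intro x old v hnd hmem
    simp only [List.map_cons, List.nodup_cons] at hnd
    by_cases hx : hd.1 = x
    · have hold : old = hd.2 := by
        rcases List.mem_cons.mp hmem with h | h
        · rw [← h]
        · exfalso
          exact hnd.1 (hx ▸ (List.mem_map.mpr ⟨(x, old), h, rfl⟩))
      have htl : tl.map (fun p => if p.1 == x then (x, v) else p) = tl := by
        conv_rhs => rw [← List.map_id tl]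
        apply List.map_congr_left
        intro p hp
        have : p.1 ≠ x := fun hc => hnd.1 (hx ▸ hc ▸ (List.mem_map.mpr ⟨p, hp, rfl⟩))
        simp [this]
      simp only [List.map_cons, hx, beq_self_eq_true, if_true, htl, List.countP_cons]
      subst hold
      push_cast
      simp only [decide_eq_true_eq]
      split_ifs <;> omega
    · have hmem' : (x, old) ∈ tl := by
        rcases List.mem_cons.mp hmem with h | h
        · exact absurd (congrArg Prod.fst h.symm) hx
        · exact h
      have := ih x old v hnd.2 hmem'
      have hne : (hd.1 == x) = false := by simp [hx]
      simp only [List.map_cons, hne, List.countP_cons]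
      push_cast at this ⊢
      simp only [decide_eq_true_eq] at this ⊢
      split_ifs <;> omega

-- Loop invariant: starting from a dict with distinct keys and result = number of its
-- value-n entries, B's fold produces A's dict together with its number of value-n entries.
lemma pv_inv (n : Int) :
    ∀ (l : List Int) (d : PySem.Dict Int Int), d.keys.Nodup →
      l.foldl (pvAltStep n) (d, ((d.items.countP (fun p => p.2 = n) : Nat) : Int))
        = (l.foldl (fun d x => d.insert x (d.getD x 0 + 1)) d,
           (((l.foldl (fun d x => d.insert x (d.getD x 0 + 1)) d).items.countP
              (fun p => p.2 = n) : Nat) : Int)) := by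
  intro l
  induction l with
  | nil => intro d _; simp
  | cons x tl ih =>
    intro d hnd
    have hnd' : (d.insert x (d.getD x 0 + 1)).keys.Nodup := PySem.Dict.nodup_keys_insert _ _ _ hnd
    have hstep : pvAltStep n (d, ((d.items.countP (fun p => p.2 = n) : Nat) : Int)) x
        = (d.insert x (d.getD x 0 + 1),
           (((d.insert x (d.getD x 0 + 1)).items.countP (fun p => p.2 = n) : Nat) : Int)) := by
      by_cases hc : d.contains x = true
      · -- existing key: entry (x, old) is replaced by (x, old + 1)
        obtain ⟨old, hget⟩ : ∃ v, d.get? x = some v := by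
          apply Option.isSome_iff_exists.mp
          rw [← PySem.Dict.contains_eq_isSome_get?, hc]
        have hmem : (x, old) ∈ d.items := PySem.Dict.mem_items_of_get?_eq_some d hget
        have hgd : d.getD x 0 = old := PySem.Dict.getD_of_get?_eq_some d 0 hget
        have hitems := PySem.Dict.items_insert_of_contains d (d.getD x 0 + 1) hc
        have hrepl := pv_countP_replace n d.items x old (old + 1) hnd hmem
        have hgd1 : (d.insert x (d.getD x 0 + 1)).getD x 0 = old + 1 := by
          rw [PySem.Dict.getD_insert_self, hgd]
        rw [hgd] at hitems hgd1
        simp only [pvAltStep, hc, if_true, hgd]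
        refine Prod.ext rfl ?_
        simp only [hitems, hgd1]
        rw [hrepl]
        split_ifs <;> omega
      · -- fresh key: entry (x, 1) is appended
        have hc' : d.contains x = false := by simpa using hc
        have hgd : d.getD x 0 = 0 := PySem.Dict.getD_of_not_contains d 0 hc'
        have hitems1 : (d.insert x 1).items = d.items ++ [(x, 1)] :=
          PySem.Dict.items_insert_of_not_contains d 1 hc'
        have hins : d.insert x (d.getD x 0 + 1) = d.insert x 1 := by rw [hgd]; norm_num
        simp only [pvAltStep, hc', Bool.false_eq_true, if_false, hins]
        refine Prod.ext rfl ?_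
        simp only [PySem.Dict.getD_insert_self, hitems1, List.countP_append,
          List.countP_cons, List.countP_nil]
        push_cast
        simp only [decide_eq_true_eq]
        split_ifs <;> omega
    rw [List.foldl_cons, hstep, List.foldl_cons]
    exact ih (d.insert x (d.getD x 0 + 1)) hnd'

-- ===== VERDICT (by name: the statement is the Claim_ definition above) =====
theorem count_elements_matching_occurences_spec : Claim_equal_count_elements_matching_occurences := by
  intro arr n _
  unfold Spec_count_elements_matching_occurences
  unfold count_elements_matching_occurences count_elements_matching_occurences_alt
  by_cases h : arr = []
  · simp [h]
  · simp only [h, if_false]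
    have hinv := pv_inv n arr PySem.Dict.empty PySem.Dict.nodup_keys_empty
    have h0 : ((PySem.Dict.empty : PySem.Dict Int Int).items.countP
        (fun p => p.2 = n) : Int) = 0 := by
      simp [PySem.Dict.empty]
    rw [h0] at hinv
    rw [hinv]
    have hfc := PySem.List.foldl_count_if (fun q : Int × Int => decide (q.2 = n))
      ((arr.foldl (fun d x => d.insert x (d.getD x 0 + 1)) PySem.Dict.empty).items) 0
    simp only [decide_eq_true_eq, zero_add] at hfc
    simp only [hfc]
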